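-- pv_equiv track=rewrite | github.com/Flower2103/Lenguajes_Automatas_I | p1.5/main.py | token_numeric
-- ===== SOURCE A (Python) =====
-- def token_numeric(array):
--     tokens = []
--     grupo_decimal = False
--     grupo_int = False
--
--     for token, _ in array:
--         if ( token >= 48 and token <= 57):
--             if not grupo_int and not grupo_decimal:
--                 tokens.append(666) # entero
--                 grupo_int = True
--         elif (token == 46):
--             if grupo_int:
--                 tokens.pop()
--                 tokens.append(777) # decimal
--                 grupo_decimal = True
--         else:
--             grupo_int = False
--             grupo_decimal = False
--             tokens.append(token)
--     return tokens
-- ===== SOURCE B (Python) =====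
-- def _flush(run):
--     # emit the classification of a buffered digit/dot run:
--     # nothing if it holds no digit; else 777 if a dot follows the first digit, else 666
--     while run and not (48 <= run[0] <= 57):
--         run = run[1:]
--     if not run:
--         return []
--     return [777 if 46 in run[1:] else 666]
--
-- def token_numeric(array):
--     out = []
--     run = []
--     for token, _ in array:
--         if 48 <= token <= 57 or token == 46:
--             run.append(token)
--         else:
--             out.extend(_flush(run))
--             run = []
--             out.append(token)
--     out.extend(_flush(run))
--     return out
-- ===== Notes on version B (the rewrite author's own statement) =====
-- stated objective: alternative
-- what changed: Replaces A's two mutable boolean flags with append/pop upgrading of the last token by a buffer-then-classify pass: digit/dot characters are accumulated into a run, and each run is flushed once (nothing without a digit, 777 if a dot follows the first digit, else 666).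
import Mathlib
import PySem

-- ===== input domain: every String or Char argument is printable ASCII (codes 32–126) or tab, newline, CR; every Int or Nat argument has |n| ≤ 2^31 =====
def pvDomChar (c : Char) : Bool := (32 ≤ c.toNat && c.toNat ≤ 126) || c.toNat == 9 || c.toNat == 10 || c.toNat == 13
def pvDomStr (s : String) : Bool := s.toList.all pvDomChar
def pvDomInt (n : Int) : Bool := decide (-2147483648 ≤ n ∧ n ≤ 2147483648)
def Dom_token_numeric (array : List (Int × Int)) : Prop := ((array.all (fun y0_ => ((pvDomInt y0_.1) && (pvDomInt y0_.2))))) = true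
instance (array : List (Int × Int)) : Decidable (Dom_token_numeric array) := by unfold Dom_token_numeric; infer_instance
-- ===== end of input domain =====

-- B replaces A's mutable flags and append/pop token upgrading with a buffer-then-classify
-- pass over digit/dot runs (objective: alternative decomposition, same cost).


-- ===== PORT A =====
-- state: (tokens, grupo_decimal, grupo_int).  tokens.pop() is ported as dropLast: it only
-- runs when grupo_int is true, at which point tokens is nonempty, so it is exact there.
def tnStepA (s : List Int × Bool × Bool) (p : Int × Int) : List Int × Bool × Bool :=
  let token := p.1
  if 48 ≤ token ∧ token ≤ 57 then
    if ¬ s.2.2 ∧ ¬ s.2.1 then (s.1 ++ [666], s.2.1, true) else s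
  else if token = 46 then
    if s.2.2 then (s.1.dropLast ++ [777], true, s.2.2) else s
  else (s.1 ++ [token], false, false)

def token_numeric (array : List (Int × Int)) : List Int :=
  (array.foldl tnStepA ([], false, false)).1

-- ===== PORT B =====
-- classify a buffered run: nothing without a digit; 777 if a dot follows the first digit, else 666
def tnFlush : List Int → List Int
  | [] => []
  | c :: rest => if 48 ≤ c ∧ c ≤ 57 then [if (46 : Int) ∈ rest then 777 else 666] else tnFlush rest

def tnStepB (s : List Int × List Int) (p : Int × Int) : List Int × List Int :=
  let token := p.1
  if (48 ≤ token ∧ token ≤ 57) ∨ token = 46 then (s.1, s.2 ++ [token])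
  else (s.1 ++ tnFlush s.2 ++ [token], [])

def token_numeric_alt (array : List (Int × Int)) : List Int :=
  let st := array.foldl tnStepB ([], [])
  st.1 ++ tnFlush st.2

-- ===== PRECONDITION & SPEC =====
def Spec_token_numeric (array : List (Int × Int)) (out : List Int) : Prop := out = token_numeric_alt array
instance (array : List (Int × Int)) (out : List Int) : Decidable (Spec_token_numeric array out) := by unfold Spec_token_numeric; infer_instance

-- ===== CLAIM (what is proved, stated in full; the proofs are below) =====
def Claim_equal_token_numeric : Prop := ∀ (array : List (Int × Int)), Dom_token_numeric array → Spec_token_numeric array (token_numeric array)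

-- ===== LEMMAS AND PROOFS =====
def tnHasDig (run : List Int) : Bool := run.any (fun c => decide (48 ≤ c ∧ c ≤ 57))
def tnGd (run : List Int) : Bool :=
  match run with
  | [] => false
  | c :: rest => if 48 ≤ c ∧ c ≤ 57 then decide ((46 : Int) ∈ rest) else tnGd rest

lemma tnHasDig_cons_eq (c : Int) (rest : List Int) :
    tnHasDig (c :: rest) = (decide (48 ≤ c ∧ c ≤ 57) || tnHasDig rest) := rfl

lemma tnHasDig_cons_false (c : Int) (rest : List Int) (h : tnHasDig (c :: rest) = false) :
    ¬ (48 ≤ c ∧ c ≤ 57) ∧ tnHasDig rest = false := by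
  rw [tnHasDig_cons_eq] at h
  simp only [Bool.or_eq_false_iff, decide_eq_false_iff_not] at h
  exact h

lemma tnHasDig_cons_true (c : Int) (rest : List Int) (h : tnHasDig (c :: rest) = true)
    (hc : ¬ (48 ≤ c ∧ c ≤ 57)) : tnHasDig rest = true := by
  rw [tnHasDig_cons_eq] at h
  simpa [hc] using h

lemma tnFlush_noDig (run : List Int) (h : tnHasDig run = false) : tnFlush run = [] := by
  induction run with
  | nil => rfl
  | cons c rest ih =>
    obtain ⟨hc, hrest⟩ := tnHasDig_cons_false c rest h
    simp [tnFlush, hc, ih hrest]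

lemma tnGd_noDig (run : List Int) (h : tnHasDig run = false) : tnGd run = false := by
  induction run with
  | nil => rfl
  | cons c rest ih =>
    obtain ⟨hc, hrest⟩ := tnHasDig_cons_false c rest h
    simp [tnGd, hc, ih hrest]

lemma tnFlush_append_first_dig (run : List Int) (t : Int) (h : tnHasDig run = false)
    (ht : 48 ≤ t ∧ t ≤ 57) : tnFlush (run ++ [t]) = [666] ∧ tnGd (run ++ [t]) = false := by
  induction run with
  | nil => simp [tnFlush, tnGd, ht]
  | cons c rest ih =>
    obtain ⟨hc, hrest⟩ := tnHasDig_cons_false c rest h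
    have := ih hrest
    simp [tnFlush, tnGd, hc, this.1, this.2]

lemma tnFlush_append_dot_noDig (run : List Int) (h : tnHasDig run = false) :
    tnFlush (run ++ [(46 : Int)]) = [] ∧ tnGd (run ++ [(46 : Int)]) = false := by
  induction run with
  | nil => simp [tnFlush, tnGd]
  | cons c rest ih =>
    obtain ⟨hc, hrest⟩ := tnHasDig_cons_false c rest h
    have := ih hrest
    simp [tnFlush, tnGd, hc, this.1, this.2]

lemma tnHasDig_append (run : List Int) (t : Int) :
    tnHasDig (run ++ [t]) = (tnHasDig run || decide (48 ≤ t ∧ t ≤ 57)) := by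
  simp [tnHasDig]

lemma tnFlush_append_dig (run : List Int) (t : Int) (h : tnHasDig run = true)
    (ht : 48 ≤ t ∧ t ≤ 57) :
    tnFlush (run ++ [t]) = tnFlush run ∧ tnGd (run ++ [t]) = tnGd run := by
  induction run with
  | nil => simp [tnHasDig] at h
  | cons c rest ih =>
    by_cases hc : 48 ≤ c ∧ c ≤ 57
    · have hne : (46 : Int) ≠ t := by omega
      simp [tnFlush, tnGd, hc, hne]
    · have hrest := tnHasDig_cons_true c rest h hc
      have := ih hrest
      simp [tnFlush, tnGd, hc, this.1, this.2]

lemma tnFlush_append_dot (run : List Int) (h : tnHasDig run = true) :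
    tnFlush (run ++ [(46 : Int)]) = [777] ∧ tnGd (run ++ [(46 : Int)]) = true := by
  induction run with
  | nil => simp [tnHasDig] at h
  | cons c rest ih =>
    by_cases hc : 48 ≤ c ∧ c ≤ 57
    · simp [tnFlush, tnGd, hc]
    · have hrest := tnHasDig_cons_true c rest h hc
      have := ih hrest
      simp [tnFlush, tnGd, hc, this.1, this.2]

lemma tnFlush_singleton (run : List Int) (h : tnHasDig run = true) :
    tnFlush run = [if tnGd run then 777 else 666] := by
  induction run with
  | nil => simp [tnHasDig] at h
  | cons c rest ih =>
    by_cases hc : 48 ≤ c ∧ c ≤ 57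
    · simp [tnFlush, tnGd, hc]
    · have hrest := tnHasDig_cons_true c rest h hc
      simp [tnFlush, tnGd, hc, ih hrest]

lemma tn_inv (l : List (Int × Int)) (out run : List Int) :
    (List.foldl tnStepA (out ++ tnFlush run, tnGd run, tnHasDig run) l).1
      = (List.foldl tnStepB (out, run) l).1 ++ tnFlush (List.foldl tnStepB (out, run) l).2 := by
  induction l generalizing out run with
  | nil => rfl
  | cons p l ih =>
    obtain ⟨t, x⟩ := p
    by_cases hd : 48 ≤ t ∧ t ≤ 57
    · -- digit
      by_cases hg : tnHasDig run = true
      · have h2 := tnFlush_append_dig run t hg hd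
        have h3 : tnHasDig (run ++ [t]) = true := by simp [tnHasDig_append, hg]
        have := ih out (run ++ [t])
        rw [h2.1, h2.2, h3] at this
        simpa [tnStepA, tnStepB, hd, hg] using this
      · have hg' : tnHasDig run = false := by simpa using hg
        have h1 := tnFlush_append_first_dig run t hg' hd
        have h3 : tnHasDig (run ++ [t]) = true := by
          simp [tnHasDig_append, hd]
        have := ih out (run ++ [t])
        rw [h1.1, h1.2, h3] at this
        simpa [tnStepA, tnStepB, hd, hg', tnFlush_noDig run hg', tnGd_noDig run hg'] using this
    · by_cases hdot : t = 46
      · subst hdot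
        by_cases hg : tnHasDig run = true
        · have h2 := tnFlush_append_dot run hg
          have h3 : tnHasDig (run ++ [(46:Int)]) = true := by simp [tnHasDig_append, hg]
          have := ih out (run ++ [(46 : Int)])
          rw [h2.1, h2.2, h3] at this
          have hsing := tnFlush_singleton run hg
          simpa [tnStepA, tnStepB, hd, hg, hsing, List.dropLast_concat] using this
        · have hg' : tnHasDig run = false := by simpa using hg
          have h1 := tnFlush_append_dot_noDig run hg'
          have h3 : tnHasDig (run ++ [(46:Int)]) = false := by
            simp [tnHasDig_append, hg']
          have := ih out (run ++ [(46 : Int)])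
          rw [h1.1, h1.2, h3] at this
          simpa [tnStepA, tnStepB, hd, hg', tnFlush_noDig run hg', tnGd_noDig run hg'] using this
      · -- other character
        have := ih (out ++ tnFlush run ++ [t]) []
        simpa [tnStepA, tnStepB, hd, hdot, tnFlush, tnGd, tnHasDig] using this

-- ===== VERDICT (by name: the statement is the Claim_ definition above) =====
theorem token_numeric_spec : Claim_equal_token_numeric := by
  intro array _
  unfold Spec_token_numeric token_numeric token_numeric_alt
  have := tn_inv array [] []
  simpa [tnFlush, tnGd, tnHasDig] using this
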